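/-
  THE LIVE SET AS DATA: objects, and the shadow invariant `ShadowOK objs mem`.

  Asan/Shadow.lean says what a CHECK decides (`Accessible`, `AccessibleSmall`) and what it means for the shadow to cover a SET of
  bytes (`Covers Live mem`). This file says which set: the bytes of a LIST OF OBJECTS that changes over the run.

      sh mem g                 the shadow byte of granule g read as a signed char (the design documents' notation);
                               `byteOK_iff_sh`: M5's `ByteOK` is `sh = 0 ∨ a % 8 < sh`
      ShadowWF mem             SH1: every shadow byte is 0 … 7 or ≥ 80H (no value 8 … 127 is ever written)
      Kind, Obj                an object: base, size, what it is
      Obj.Bytes o              its bytes [base, base + size)            Obj.gLo / gHi: the granules it owns, half-open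
      Live objs                the bytes of all objects of the list
      GranDisj o o'            two objects share no granule
      CoversObj mem o          the design's `Covers m (b, sz)`: 8-aligned, inside the data space, full granules 0, a last partial
                               granule holds size % 8 exactly. IMPLIES `Covers o.Bytes mem` (`CoversObj.covers`)
      Obj.acc_of_obj           THE ONE LEMMA EVERY CHECK SITE USES: an access inside one covered object passes the check
                               (`Obj.accSmall_of_obj` for the 1 / 2 / 4 / 8-byte checks; on the invariant: `ShadowOK.acc / .accSmall`)
      ShadowOK objs mem        SH1 ∧ SH2 ∧ SH3: `ShadowWF`, `Covers (Live objs)`, the objects pairwise granule-disjoint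

  WHAT `ShadowOK` DOES NOT SAY, ON PURPOSE. There is no clause "everything else is poisoned". The safety proof relies on red zones
  NOWHERE (STRATEGY §1, CAVEAT): two accessible regions that touch can be hopped between without meeting a red zone, so "the shadow
  says accessible" proves nothing about WHICH object was hit. Every check site is therefore discharged object-level — "this address
  lies inside THIS live object", `Obj.acc_of_obj` / `ShadowOK.acc` — and the exact shadow values of red zones appear only where the
  MAINTENANCE of the invariant needs them: a protected frame's shadow must be known in order to show that the epilogue's zero stores
  clean it (`FramePoisoned`, Asan/Stack.lean). `Poisoned` below is offered for remarks about tightness, not used by any lemma.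

  WHY THE OBJECTS NEVER SHARE A GRANULE (SH3), per kind — the alignment facts the callers of `ShadowOK.add` supply:
      arena setup / temp block   8-aligned offsets in an 8-aligned arena, blocks padded to a multiple of 8, ≥ 32 poisoned bytes between
      stack object               its own 16-byte-aligned slot of a frame whose base is a multiple of 8 (Vorbis/Frames.lean: `FrameLayout.OK`)
      registered global          32-aligned, followed by its own red zone up to the next 32-aligned global
      input / output             alone in their windows: 200000H + len ≤ 3FF000H < 400000H; 400000H + 300000H = 700000H

  HOW THE LIVE SET CHANGES: every shadow store of the program belongs to one of four store sequences, defined here as functions on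
  memory so that a contract can say `v.mem = unpoisonMem u.mem a n`:
      fillMem mem g v k        k one-byte stores of v at the shadow bytes of granules g, g + 1, …         (the loops of the runtime)
      unpoisonMem mem a n      `arena_unpoison(a, n)`: n / 8 stores of 0, then, if n % 8 ≠ 0, one store of n % 8
      poisonMem mem a n        `arena_poison(a, n)`: ⌈n / 8⌉ stores of FAH
      registerMem mem ds       `__asan_register_globals`: per descriptor, the partial value `end % 8` if any, then F9H up to the slot's end
      storesMem mem g0 ss      the compiler's inline 4- / 8-byte stores of a prologue or an epilogue (`ShadowStore`; Asan/Stack.lean)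
  each with its closed form (`shadowOf_…`, built on M5's `shadowOf_write` / `shadowOf_writeLE`) and its effect on the invariant:
      ShadowOK.change          the general step: the shadow changes on granules [g0, g1) only; every object of the new list is an old
                               one away from [g0, g1), or is covered in the new memory
      ShadowOK.unpoison        + one object (arena block)          ShadowOK.poison        − the objects inside the poisoned range
      ShadowOK.register        + the registered globals            ShadowOK.sublist / .eqOn / .perm
      Sealed.of_same           M5's seal is kept by every one of them (`sealed_unpoisonMem`, `sealed_poisonMem`, `sealed_registerMem`, `sealed_storesMem`)
  Addresses are numbers, as in Asan/Shadow.lean.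
-/
import Asan.Shadow
namespace Asan
open X86 X86.User

/-! ### Shadow bytes as signed chars; well-formed shadow -/

/-- A shadow byte is a byte. -/
theorem shadowOf_lt (mem : Mem) (g : Nat) : shadowOf mem g < 256 := by
  unfold shadowOf
  exact UInt8.toNat_lt _

/-- The shadow byte of granule `g` read as a SIGNED char: the notation `sh m g` of the design documents (I6 §1.1). -/
def sh (mem : Mem) (g : Nat) : Int :=
  if shadowOf mem g < 128 then (shadowOf mem g : Int) else (shadowOf mem g : Int) - 256

/-- M5's byte test is the design's: `sh = 0`, or the offset in the granule is below `sh` as signed numbers. -/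
theorem byteOK_iff_sh (mem : Mem) (a : Nat) :
    ByteOK mem a ↔ (sh mem (a / 8) = 0 ∨ ((a % 8 : Nat) : Int) < sh mem (a / 8)) := by
  have hlt := shadowOf_lt mem (a / 8)
  unfold ByteOK ByteOKv shadowByte sh
  by_cases h : shadowOf mem (a / 8) < 128
  · rw [if_pos h]
    omega
  · rw [if_neg h]
    omega

/-- A shadow VALUE that the program writes: 0 … 7 (accessible, wholly or partly) or 80H … FFH (poisoned). -/
def WFv (s : Nat) : Prop := s ≤ 7 ∨ 128 ≤ s

instance (s : Nat) : Decidable (WFv s) := by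
  unfold WFv
  infer_instance

/-- **SH1: the shadow is well formed**: no shadow byte has a value 8 … 127. (Such a value would make the runtime accept the
granule when it is the last of an access and refuse it otherwise; none is ever written.) -/
def ShadowWF (mem : Mem) : Prop := ∀ g, g < 0x200000 → WFv (shadowOf mem g)

/-- The design's form of SH1: every shadow byte is at most 7 as a signed char. -/
theorem shadowWF_iff_sh (mem : Mem) : ShadowWF mem ↔ ∀ g, g < 0x200000 → sh mem g ≤ 7 := by
  unfold ShadowWF WFv sh
  constructor
  · intro h g hg
    have := h g hg
    have hlt := shadowOf_lt mem g
    by_cases h1 : shadowOf mem g < 128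
    · rw [if_pos h1]
      omega
    · rw [if_neg h1]
      omega
  · intro h g hg
    have := h g hg
    by_cases h1 : shadowOf mem g < 128
    · rw [if_pos h1] at this
      omega
    · omega

/-- Under SH1 the runtime's byte test and the strict one agree. -/
theorem ByteOK.granOK {mem : Mem} {a : Nat} (hwf : ShadowWF mem) (ha : a < 0x1000000) (h : ByteOK mem a) : GranOK mem a := by
  have := hwf (a / 8) (by omega)
  unfold ByteOK ByteOKv shadowByte at h
  unfold GranOK GranOKv shadowByte
  unfold WFv at this
  omega

/-- A store outside the shadow keeps SH1. -/
theorem ShadowWF.eqOn {mem mem' : Mem} (h : ShadowWF mem) (he : Mem.EqOn 0xC00000 0xE00000 mem mem') : ShadowWF mem' := by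
  intro g hg
  rw [shadowOf_eqOn he g hg]
  exact h g hg

/-- The granules `[lo / 8, hi / 8)` have shadow 0: a region that is wholly accessible (the stack below the stack pointer: `StackClean`
of Asan/Stack.lean; the image before the globals are registered). -/
def Clean (mem : Mem) (lo hi : Nat) : Prop := ∀ g, lo / 8 ≤ g → g < hi / 8 → shadowOf mem g = 0

theorem Clean.mono {mem : Mem} {lo hi lo' hi' : Nat} (h : Clean mem lo hi) (h1 : lo ≤ lo') (h2 : hi' ≤ hi) : Clean mem lo' hi' := by
  intro g hg1 hg2
  exact h g (by omega) (by omega)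

theorem Clean.eqOn {mem mem' : Mem} {lo hi : Nat} (h : Clean mem lo hi) (hhi : hi ≤ 0x1000000)
    (he : Mem.EqOn 0xC00000 0xE00000 mem mem') : Clean mem' lo hi := by
  intro g hg1 hg2
  rw [shadowOf_eqOn he g (by omega)]
  exact h g hg1 hg2

/-- The granules `[lo / 8, hi / 8)` are poisoned (a red zone, a freed block). NOT used by the safety argument (see the header); offered
for statements about how tight the instrumentation is. -/
def Poisoned (mem : Mem) (lo hi : Nat) : Prop := ∀ g, lo / 8 ≤ g → g < hi / 8 → 128 ≤ shadowOf mem g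

/-- No byte of a poisoned region passes the runtime's test. -/
theorem Poisoned.not_byteOK {mem : Mem} {lo hi : Nat} (h : Poisoned mem lo hi) (a : Nat) (h1 : lo ≤ a) (h2 : a < hi / 8 * 8) :
    ¬ ByteOK mem a := by
  intro hb
  have := h (a / 8) (by omega) (by omega)
  unfold ByteOK ByteOKv shadowByte at hb
  omega

/-- The seal is kept by whatever changes the shadow only on granules `[g0, g1)` inside the shadow of the data space
`[100000H, C00000H)`, that is inside `[20000H, 180000H)`. (Every shadow writer of the program: the seal is what turns a passed
check into the side condition of the access that follows, `Accessible.has`.) -/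
theorem Sealed.of_same {mem mem' : Mem} (hs : Sealed mem) (g0 g1 : Nat) (h0 : 0x20000 ≤ g0) (h1 : g1 ≤ 0x180000)
    (hsame : ∀ g, g < 0x200000 → (g < g0 ∨ g1 ≤ g) → shadowOf mem' g = shadowOf mem g) : Sealed mem' := by
  intro g hg hout
  rw [hsame g hg (by omega)]
  exact hs g hg hout

/-! ### Objects -/

/-- What an object is. `data`: an image datum that no check ever meets (literal pools, frame-description strings, the
descriptors, `.init_array`); `global`: one of the globals registered with the sanitizer; `stack`: an address-taken local of a
protected frame; `setup` / `temp`: a block of the decoder's arena; `input`, `output`: the two buffers of the harness; `param`: the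
parameter block at 1FF000H (read by the stub only; its shadow is FFH, so it is never in a `ShadowOK` list: the kind exists for
the footprint vocabulary of the contracts). -/
inductive Kind where
  | data | global | stack | setup | temp | input | output | param
  deriving DecidableEq, Repr

/-- **An object**: the bytes `[base, base + size)`. -/
structure Obj where
  base : Nat
  size : Nat
  kind : Kind
  deriving DecidableEq, Repr

namespace Obj

/-- The byte at `a` belongs to the object. -/
def Bytes (o : Obj) (a : Nat) : Prop := o.base ≤ a ∧ a < o.base + o.size

/-- The first granule the object owns. -/
def gLo (o : Obj) : Nat := o.base / 8

/-- One past the last granule the object owns (a last, partial granule is owned whole). -/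
def gHi (o : Obj) : Nat := (o.base + o.size + 7) / 8

/-- The granule of a byte of the object is one of the object's granules. -/
theorem gran_of_bytes {o : Obj} {a : Nat} (h : o.Bytes a) : o.gLo ≤ a / 8 ∧ a / 8 < o.gHi := by
  unfold Bytes at h
  unfold gLo gHi
  omega

/-- A range inside the object consists of bytes of the object. -/
theorem inLive {o : Obj} {a n : Nat} (h1 : o.base ≤ a) (h2 : a + n ≤ o.base + o.size) : InLive o.Bytes a n := by
  intro i hi
  unfold Bytes
  omega

end Obj

/-- **The live bytes**: the bytes of the objects of the list. -/
def Live (objs : List Obj) (a : Nat) : Prop := ∃ o, o ∈ objs ∧ o.Bytes a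

/-- **Two objects share no granule.** -/
def GranDisj (o o' : Obj) : Prop := o.gHi ≤ o'.gLo ∨ o'.gHi ≤ o.gLo

instance (o o' : Obj) : Decidable (GranDisj o o') := by
  unfold GranDisj
  infer_instance

theorem GranDisj.symm {o o' : Obj} (h : GranDisj o o') : GranDisj o' o := Or.symm h

/-- Objects whose byte ranges are apart and whose bases are multiples of 8 share no granule. (The form in which the kinds of
the header establish SH3.) -/
theorem GranDisj.of_aligned {o o' : Obj} (h8 : o.base % 8 = 0) (h8' : o'.base % 8 = 0)
    (h : (o.base + o.size + 7) / 8 * 8 ≤ o'.base ∨ (o'.base + o'.size + 7) / 8 * 8 ≤ o.base) : GranDisj o o' := by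
  unfold GranDisj Obj.gLo Obj.gHi
  omega

/-- The cover of the live set is the cover of every object. -/
theorem covers_live_iff (objs : List Obj) (mem : Mem) : Covers (Live objs) mem ↔ ∀ o, o ∈ objs → Covers o.Bytes mem := by
  constructor
  · intro h o ho
    exact h.mono (fun a ha => ⟨o, ho, ha⟩)
  · intro h
    constructor
    · intro a ha
      obtain ⟨o, ho, hb⟩ := ha
      exact (h o ho).inside a hb
    · intro a ha
      obtain ⟨o, ho, hb⟩ := ha
      exact (h o ho).ok a hb

/-! ### The design's `Covers m (b, sz)`, and the lemma every check site uses -/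

/-- **The shadow describes the object EXACTLY** (I6 §2.1 `Covers m o`): the object starts on a granule and lies in the data space,
its full granules have shadow 0, and if its size is not a multiple of 8 its last granule holds `size % 8`. What `arena_unpoison`,
a prologue and `__asan_register_globals` establish. -/
structure CoversObj (mem : Mem) (o : Obj) : Prop where
  aligned : o.base % 8 = 0
  lo : 0x100000 ≤ o.base
  hi : o.base + o.size ≤ 0xC00000
  full : ∀ g, o.base / 8 ≤ g → g < (o.base + o.size) / 8 → shadowOf mem g = 0
  part : o.size % 8 ≠ 0 → shadowOf mem ((o.base + o.size) / 8) = o.size % 8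

/-- An exactly described object is covered in M5's sense: each of its bytes is strictly accessible. -/
theorem CoversObj.covers {mem : Mem} {o : Obj} (h : CoversObj mem o) : Covers o.Bytes mem := by
  have h8 := h.aligned
  have hlo := h.lo
  have hhi := h.hi
  constructor
  · intro a ha
    unfold Obj.Bytes at ha
    omega
  · intro a ha
    unfold Obj.Bytes at ha
    unfold GranOK GranOKv shadowByte
    by_cases hg : a / 8 < (o.base + o.size) / 8
    · left
      exact h.full (a / 8) (by omega) hg
    · have hsame : a / 8 = (o.base + o.size) / 8 := by omega
      have hne : o.size % 8 ≠ 0 := by omega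
      right
      rw [hsame, h.part hne]
      omega

/-- **THE ONE LEMMA EVERY CHECK SITE USES** (16-byte and N-byte checks): an access of `n ≥ 1` bytes that lies inside one covered
object passes. (In the namespace `Obj`: `Vorbis.acc_of_obj` of Vorbis/Fields/Core.lean is the same lemma over `Block`s and a live
SET; Vorbis/ObjBlock.lean connects the two.) -/
theorem Obj.acc_of_obj {mem : Mem} {o : Obj} (hc : Covers o.Bytes mem) {a n : Nat} (h1 : o.base ≤ a)
    (h2 : a + n ≤ o.base + o.size) (hn : 1 ≤ n) : Accessible mem a n :=
  hc.accessible hn (Obj.inLive h1 h2)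

/-- The same for the 1-, 2-, 4-, 8-byte checks. -/
theorem Obj.accSmall_of_obj {mem : Mem} {o : Obj} (hc : Covers o.Bytes mem) {a n : Nat} (h1 : o.base ≤ a)
    (h2 : a + n ≤ o.base + o.size) (hn : 1 ≤ n) : AccessibleSmall mem a n :=
  hc.accessibleSmall hn (Obj.inLive h1 h2)

/-! ### The invariant -/

/-- **THE SHADOW INVARIANT for the live objects `objs`** (SH1, SH2, SH3 of INVARIANTS.md). Nothing about red zones: see the header. -/
structure ShadowOK (objs : List Obj) (mem : Mem) : Prop where
  /-- SH1: no shadow byte has a value 8 … 127 -/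
  wf : ShadowWF mem
  /-- SH2: every byte of every live object is strictly accessible, and the objects lie in `[100000H, C00000H)` -/
  covers : Covers (Live objs) mem
  /-- SH3: no two objects share a granule -/
  disjoint : objs.Pairwise GranDisj

namespace ShadowOK
variable {objs objs' : List Obj} {mem mem' : Mem}

/-- The cover of one live object. -/
theorem obj (h : ShadowOK objs mem) {o : Obj} (ho : o ∈ objs) : Covers o.Bytes mem :=
  (covers_live_iff objs mem).mp h.covers o ho

/-- **A check site, 16 / N bytes**: the access lies inside the live object `o`. -/
theorem acc (h : ShadowOK objs mem) {o : Obj} (ho : o ∈ objs) {a n : Nat} (h1 : o.base ≤ a)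
    (h2 : a + n ≤ o.base + o.size) (hn : 1 ≤ n) : Accessible mem a n :=
  Obj.acc_of_obj (h.obj ho) h1 h2 hn

/-- **A check site, 1 / 2 / 4 / 8 bytes.** -/
theorem accSmall (h : ShadowOK objs mem) {o : Obj} (ho : o ∈ objs) {a n : Nat} (h1 : o.base ≤ a)
    (h2 : a + n ≤ o.base + o.size) (hn : 1 ≤ n) : AccessibleSmall mem a n :=
  Obj.accSmall_of_obj (h.obj ho) h1 h2 hn

/-- A live object lies in the data space. -/
theorem inside (h : ShadowOK objs mem) {o : Obj} (ho : o ∈ objs) (hs : 0 < o.size) :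
    0x100000 ≤ o.base ∧ o.base + o.size ≤ 0xC00000 := by
  have hc := h.obj ho
  have h0 := hc.inside o.base (by unfold Obj.Bytes; omega)
  have h1 := hc.inside (o.base + o.size - 1) (by unfold Obj.Bytes; omega)
  omega

/-- **The default frame condition (SH8)**: a function that writes no shadow byte keeps the invariant. -/
theorem eqOn (h : ShadowOK objs mem) (he : Mem.EqOn 0xC00000 0xE00000 mem mem') : ShadowOK objs mem' :=
  ⟨h.wf.eqOn he, h.covers.eqOn he, h.disjoint⟩

/-- **THE GENERAL STEP.** The shadow changes on the granules `[g0, g1)` only, to well-formed values; every object of the new list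
is an old object none of whose granules is in `[g0, g1)`, or is covered in the new memory; the new list is pairwise disjoint. -/
theorem change (h : ShadowOK objs mem) (g0 g1 : Nat)
    (hsame : ∀ g, g < 0x200000 → (g < g0 ∨ g1 ≤ g) → shadowOf mem' g = shadowOf mem g)
    (hwf : ∀ g, g < 0x200000 → g0 ≤ g → g < g1 → WFv (shadowOf mem' g))
    (hobjs : ∀ o, o ∈ objs' → (o ∈ objs ∧ (o.gHi ≤ g0 ∨ g1 ≤ o.gLo)) ∨ Covers o.Bytes mem')
    (hdisj : objs'.Pairwise GranDisj) : ShadowOK objs' mem' := by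
  refine ⟨?_, ?_, hdisj⟩
  · intro g hg
    by_cases hin : g0 ≤ g ∧ g < g1
    · exact hwf g hg hin.1 hin.2
    · rw [hsame g hg (by omega)]
      exact h.wf g hg
  · rw [covers_live_iff]
    intro o ho
    rcases hobjs o ho with ⟨hold, hout⟩ | hnew
    · have hc := h.obj hold
      constructor
      · exact hc.inside
      · intro a ha
        have hin := hc.inside a ha
        have hgr := Obj.gran_of_bytes ha
        have hok := hc.ok a ha
        unfold GranOK shadowByte at hok ⊢
        rw [hsame (a / 8) (by omega) (by omega)]
        exact hok
    · exact hnew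

/-- Fewer objects. -/
theorem sublist (h : ShadowOK objs mem) (hs : objs'.Sublist objs) : ShadowOK objs' mem := by
  refine h.change 0 0 (fun _ _ _ => rfl) ?_ ?_ (h.disjoint.sublist hs)
  · intro g _ h0 h1
    omega
  · intro o ho
    left
    exact ⟨hs.subset ho, Or.inr (Nat.zero_le _)⟩

/-- The order of the list does not matter. -/
theorem perm (h : ShadowOK objs mem) (hp : objs.Perm objs') : ShadowOK objs' mem := by
  refine ⟨h.wf, ?_, ?_⟩
  · apply h.covers.mono
    intro a ha
    obtain ⟨o, ho, hb⟩ := ha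
    exact ⟨o, hp.mem_iff.mpr ho, hb⟩
  · exact (hp.pairwise_iff (fun hab => GranDisj.symm hab)).mp h.disjoint

/-- **One more object**: the shadow changed inside the new object's granules only, the new object is covered and shares no granule
with an old one. -/
theorem add (h : ShadowOK objs mem) (o : Obj)
    (hsame : ∀ g, g < 0x200000 → (g < o.gLo ∨ o.gHi ≤ g) → shadowOf mem' g = shadowOf mem g)
    (hwf : ∀ g, g < 0x200000 → o.gLo ≤ g → g < o.gHi → WFv (shadowOf mem' g))
    (hcov : Covers o.Bytes mem')
    (hdisj : ∀ o', o' ∈ objs → GranDisj o o') : ShadowOK (o :: objs) mem' := by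
  refine h.change o.gLo o.gHi hsame hwf ?_ ?_
  · intro o' ho'
    rcases List.mem_cons.mp ho' with rfl | hold
    · exact Or.inr hcov
    · left
      refine ⟨hold, ?_⟩
      have := hdisj o' hold
      unfold GranDisj at this
      omega
  · exact List.pairwise_cons.mpr ⟨hdisj, h.disjoint⟩

end ShadowOK

/-! ### The store sequences of the runtime -/

/-- **`k` one-byte stores of `v`** at the shadow bytes of the granules `g, g + 1, …, g + k - 1`, in ascending order: the loops of
`arena_unpoison` (v = 0), `arena_poison` (FAH) and `__asan_register_globals` (F9H). -/
def fillMem (mem : Mem) (g : Nat) (v : Byte) : Nat → Mem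
  | 0 => mem
  | k + 1 => fillMem (mem.write (shadowAddr g) v) (g + 1) v k

/-- The shadow after `fillMem`, outside the granules written. -/
theorem shadowOf_fillMem_out (mem : Mem) (g : Nat) (v : Byte) (k g' : Nat) (hg : g + k ≤ 0x200000) (hg' : g' < 0x200000)
    (hout : g' < g ∨ g + k ≤ g') : shadowOf (fillMem mem g v k) g' = shadowOf mem g' := by
  induction k generalizing mem g with
  | zero => rfl
  | succ k ih =>
    simp only [fillMem]
    rw [ih _ (g + 1) (by omega) (by omega), shadowOf_write mem g g' v (by omega) hg']
    have e : ¬ g' = g := by omega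
    rw [if_neg e]

/-- The shadow after `fillMem`, at a granule written. -/
theorem shadowOf_fillMem_in (mem : Mem) (g : Nat) (v : Byte) (k g' : Nat) (hg : g + k ≤ 0x200000) (h1 : g ≤ g')
    (h2 : g' < g + k) : shadowOf (fillMem mem g v k) g' = v.toNat := by
  induction k generalizing mem g with
  | zero => omega
  | succ k ih =>
    simp only [fillMem]
    by_cases e : g' = g
    · rw [shadowOf_fillMem_out _ (g + 1) v k g' (by omega) (by omega) (by omega),
        shadowOf_write mem g g' v (by omega) (by omega), if_pos e]
    · exact ih _ (g + 1) (by omega) (by omega) (by omega)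

/-- `fillMem` writes the shadow bytes of its granules only. -/
theorem fillMem_read_other (mem : Mem) (g : Nat) (v : Byte) (k : Nat) (a : Word) (hg : g + k ≤ 0x200000)
    (ha : a.toNat < 0xC00000 + g ∨ 0xC00000 + g + k ≤ a.toNat) : (fillMem mem g v k).read a = mem.read a := by
  induction k generalizing mem g with
  | zero => rfl
  | succ k ih =>
    simp only [fillMem]
    rw [ih _ (g + 1) (by omega) (by omega)]
    apply Mem.read_write_other
    intro e
    have := shadowAddr_toNat g (by omega)
    rw [e] at this
    omega

/-- The footprint of `fillMem`, as a contract states it. -/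
theorem fillMem_sameExcept (mem : Mem) (g : Nat) (v : Byte) (k : Nat) (hg : g + k ≤ 0x200000) :
    Mem.SameExcept [⟨0xC00000 + g, 0xC00000 + g + k⟩] mem (fillMem mem g v k) := by
  intro a ha
  have := ha ⟨0xC00000 + g, 0xC00000 + g + k⟩ List.mem_cons_self
  exact fillMem_read_other mem g v k a hg this

/-- **The memory after `arena_unpoison(a, n)`** (asan_rt.c; `a` a multiple of 8, `n ≥ 0`): `n / 8` stores of 0 from granule `a / 8`
on, then, if `n % 8 ≠ 0`, one store of `n % 8` at the next granule. Nothing else is written (the routine is a leaf without a frame). -/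
def unpoisonMem (mem : Mem) (a n : Nat) : Mem :=
  if n % 8 = 0 then fillMem mem (a / 8) 0 (n / 8)
  else (fillMem mem (a / 8) 0 (n / 8)).write (shadowAddr (a / 8 + n / 8)) (UInt8.ofNat (n % 8))

/-- After `arena_unpoison(a, n)`: the full granules of `[a, a + n)` have shadow 0. -/
theorem shadowOf_unpoisonMem_full (mem : Mem) (a n g' : Nat) (h8 : a % 8 = 0) (hhi : a + n ≤ 0xC00000)
    (h1 : a / 8 ≤ g') (h2 : g' < (a + n) / 8) : shadowOf (unpoisonMem mem a n) g' = 0 := by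
  unfold unpoisonMem
  by_cases hn : n % 8 = 0
  · rw [if_pos hn, shadowOf_fillMem_in mem (a / 8) 0 (n / 8) g' (by omega) h1 (by omega)]
    rfl
  · rw [if_neg hn, shadowOf_write _ _ g' _ (by omega) (by omega)]
    have e : ¬ g' = a / 8 + n / 8 := by omega
    rw [if_neg e, shadowOf_fillMem_in mem (a / 8) 0 (n / 8) g' (by omega) h1 (by omega)]
    rfl

/-- After `arena_unpoison(a, n)` with `n % 8 ≠ 0`: the last granule holds `n % 8`. -/
theorem shadowOf_unpoisonMem_part (mem : Mem) (a n : Nat) (h8 : a % 8 = 0) (hhi : a + n ≤ 0xC00000) (hn : n % 8 ≠ 0) :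
    shadowOf (unpoisonMem mem a n) ((a + n) / 8) = n % 8 := by
  unfold unpoisonMem
  have e : (a + n) / 8 = a / 8 + n / 8 := by omega
  rw [if_neg hn, e, shadowOf_write _ _ _ _ (by omega) (by omega), if_pos rfl, UInt8.toNat_ofNat']
  omega

/-- After `arena_unpoison(a, n)`: every other granule is unchanged. -/
theorem shadowOf_unpoisonMem_out (mem : Mem) (a n g' : Nat) (h8 : a % 8 = 0) (hhi : a + n ≤ 0xC00000) (hg' : g' < 0x200000)
    (hout : g' < a / 8 ∨ (a + n + 7) / 8 ≤ g') : shadowOf (unpoisonMem mem a n) g' = shadowOf mem g' := by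
  unfold unpoisonMem
  by_cases hn : n % 8 = 0
  · rw [if_pos hn]
    exact shadowOf_fillMem_out mem (a / 8) 0 (n / 8) g' (by omega) hg' (by omega)
  · rw [if_neg hn, shadowOf_write _ _ g' _ (by omega) hg']
    have e : ¬ g' = a / 8 + n / 8 := by omega
    rw [if_neg e]
    exact shadowOf_fillMem_out mem (a / 8) 0 (n / 8) g' (by omega) hg' (by omega)

/-- `arena_unpoison(a, n)` writes only the shadow bytes of the granules of `[a, a + n)`: its footprint is `shadowSpan a (a + n)`. -/
theorem unpoisonMem_sameExcept (mem : Mem) (a n : Nat) (h8 : a % 8 = 0) (hhi : a + n ≤ 0xC00000) :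
    Mem.SameExcept [shadowSpan a (a + n)] mem (unpoisonMem mem a n) := by
  intro x hx
  have hx' := hx (shadowSpan a (a + n)) List.mem_cons_self
  unfold shadowSpan at hx'
  simp only at hx'
  unfold unpoisonMem
  by_cases hn : n % 8 = 0
  · rw [if_pos hn]
    exact fillMem_read_other mem (a / 8) 0 (n / 8) x (by omega) (by omega)
  · rw [if_neg hn, Mem.read_write_other]
    · exact fillMem_read_other mem (a / 8) 0 (n / 8) x (by omega) (by omega)
    · intro e
      have := shadowAddr_toNat (a / 8 + n / 8) (by omega)
      rw [e] at this
      omega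

/-- **`arena_unpoison(a, n)` describes the new block exactly.** -/
theorem coversObj_unpoisonMem (mem : Mem) (o : Obj) (h8 : o.base % 8 = 0) (hlo : 0x100000 ≤ o.base)
    (hhi : o.base + o.size ≤ 0xC00000) : CoversObj (unpoisonMem mem o.base o.size) o := by
  refine ⟨h8, hlo, hhi, ?_, ?_⟩
  · intro g hg1 hg2
    exact shadowOf_unpoisonMem_full mem o.base o.size g h8 hhi hg1 hg2
  · intro hne
    exact shadowOf_unpoisonMem_part mem o.base o.size h8 hhi hne

/-- **`arena_unpoison`: + one object.** The new block is 8-aligned, lies in the data space, and shares no granule with a live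
object (arena blocks: AR3 / AR4 of INVARIANTS.md give both). -/
theorem ShadowOK.unpoison {objs : List Obj} {mem : Mem} (h : ShadowOK objs mem) (o : Obj) (h8 : o.base % 8 = 0)
    (hlo : 0x100000 ≤ o.base) (hhi : o.base + o.size ≤ 0xC00000) (hdisj : ∀ o', o' ∈ objs → GranDisj o o') :
    ShadowOK (o :: objs) (unpoisonMem mem o.base o.size) := by
  refine h.add o ?_ ?_ (coversObj_unpoisonMem mem o h8 hlo hhi).covers hdisj
  · intro g hg hout
    unfold Obj.gLo Obj.gHi at hout
    exact shadowOf_unpoisonMem_out mem o.base o.size g h8 hhi hg hout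
  · intro g hg hg1 hg2
    unfold Obj.gLo at hg1
    unfold Obj.gHi at hg2
    unfold WFv
    by_cases e1 : g < (o.base + o.size) / 8
    · rw [shadowOf_unpoisonMem_full mem o.base o.size g h8 hhi hg1 e1]
      omega
    · have e2 : g = (o.base + o.size) / 8 := by omega
      have e3 : o.size % 8 ≠ 0 := by omega
      rw [e2, shadowOf_unpoisonMem_part mem o.base o.size h8 hhi e3]
      omega

/-- **The memory after `arena_poison(a, n)`** (`a` a multiple of 8, `n ≥ 0`): `⌈n / 8⌉` stores of FAH from granule `a / 8` on. -/
def poisonMem (mem : Mem) (a n : Nat) : Mem := fillMem mem (a / 8) 0xFA ((n + 7) / 8)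

/-- After `arena_poison(a, n)`: every granule that meets `[a, a + n)` holds FAH. -/
theorem shadowOf_poisonMem_in (mem : Mem) (a n g' : Nat) (h8 : a % 8 = 0) (hhi : a + (n + 7) / 8 * 8 ≤ 0xC00000)
    (h1 : a / 8 ≤ g') (h2 : g' < (a + n + 7) / 8) : shadowOf (poisonMem mem a n) g' = 0xFA := by
  unfold poisonMem
  rw [shadowOf_fillMem_in mem (a / 8) 0xFA ((n + 7) / 8) g' (by omega) h1 (by omega)]
  rfl

/-- After `arena_poison(a, n)`: every other granule is unchanged. -/
theorem shadowOf_poisonMem_out (mem : Mem) (a n g' : Nat) (h8 : a % 8 = 0) (hhi : a + (n + 7) / 8 * 8 ≤ 0xC00000) (hg' : g' < 0x200000)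
    (hout : g' < a / 8 ∨ (a + n + 7) / 8 ≤ g') : shadowOf (poisonMem mem a n) g' = shadowOf mem g' := by
  unfold poisonMem
  exact shadowOf_fillMem_out mem (a / 8) 0xFA ((n + 7) / 8) g' (by omega) hg' (by omega)

/-- The footprint of `arena_poison(a, n)`: `shadowSpan a (a + n)`. -/
theorem poisonMem_sameExcept (mem : Mem) (a n : Nat) (h8 : a % 8 = 0) (hhi : a + (n + 7) / 8 * 8 ≤ 0xC00000) :
    Mem.SameExcept [shadowSpan a (a + n)] mem (poisonMem mem a n) := by
  intro x hx
  have hx' := hx (shadowSpan a (a + n)) List.mem_cons_self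
  unfold shadowSpan at hx'
  simp only at hx'
  unfold poisonMem
  exact fillMem_read_other mem (a / 8) 0xFA ((n + 7) / 8) x (by omega) (by omega)

/-- The poisoned range is poisoned (a remark about tightness: a freed temp block cannot be used through a check). -/
theorem poisonMem_poisoned (mem : Mem) (a n : Nat) (h8 : a % 8 = 0) (hhi : a + (n + 7) / 8 * 8 ≤ 0xC00000) :
    Poisoned (poisonMem mem a n) a (a + n + 7) := by
  intro g hg1 hg2
  rw [shadowOf_poisonMem_in mem a n g h8 hhi hg1 hg2]
  omega

/-- **`arena_poison`: − the objects in the poisoned range.** Whatever sublist of the live objects has no granule in the range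
stays live (`setup_temp_free`: all but the top temp block; `arena_temp_restore`: all but the temp blocks below the mark). -/
theorem ShadowOK.poison {objs objs' : List Obj} {mem : Mem} (h : ShadowOK objs mem) (a n : Nat) (h8 : a % 8 = 0)
    (hhi : a + (n + 7) / 8 * 8 ≤ 0xC00000) (hs : objs'.Sublist objs)
    (hout : ∀ o, o ∈ objs' → o.gHi ≤ a / 8 ∨ (a + n + 7) / 8 ≤ o.gLo) : ShadowOK objs' (poisonMem mem a n) := by
  refine h.change (a / 8) ((a + n + 7) / 8) ?_ ?_ ?_ (h.disjoint.sublist hs)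
  · intro g hg hg2
    exact shadowOf_poisonMem_out mem a n g h8 hhi hg hg2
  · intro g hg hg1 hg2
    rw [shadowOf_poisonMem_in mem a n g h8 hhi hg1 hg2]
    unfold WFv
    omega
  · intro o ho
    exact Or.inl ⟨hs.subset ho, hout o ho⟩

/-- `arena_unpoison` keeps the seal. -/
theorem sealed_unpoisonMem {mem : Mem} (hs : Sealed mem) (a n : Nat) (h8 : a % 8 = 0) (hlo : 0x100000 ≤ a)
    (hhi : a + n ≤ 0xC00000) : Sealed (unpoisonMem mem a n) :=
  hs.of_same (a / 8) ((a + n + 7) / 8) (by omega) (by omega)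
    (fun g hg hout => shadowOf_unpoisonMem_out mem a n g h8 hhi hg hout)

/-- `arena_poison` keeps the seal. -/
theorem sealed_poisonMem {mem : Mem} (hs : Sealed mem) (a n : Nat) (h8 : a % 8 = 0) (hlo : 0x100000 ≤ a)
    (hhi : a + (n + 7) / 8 * 8 ≤ 0xC00000) : Sealed (poisonMem mem a n) :=
  hs.of_same (a / 8) ((a + n + 7) / 8) (by omega) (by omega)
    (fun g hg hout => shadowOf_poisonMem_out mem a n g h8 hhi hg hout)

/-! ### `__asan_register_globals` -/

/-- The three words of a descriptor (`struct asan_global`, 64 bytes) that the runtime reads: the global `[beg, beg + size)` and the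
slot `[beg, beg + sizeRz)` gcc gave it (the global, then its red zone; 32-aligned, a multiple of 32 long). -/
structure GlobalDesc where
  beg : Nat
  size : Nat
  sizeRz : Nat
  deriving DecidableEq, Repr

/-- The object a descriptor registers. -/
def GlobalDesc.obj (d : GlobalDesc) : Obj := ⟨d.beg, d.size, .global⟩

/-- What gcc guarantees of a descriptor, as far as the proof needs it: the slot starts on a granule, is a whole number of granules,
contains the global, and lies in the image. (Decidable: checked by evaluation for the generated table.) -/
def GlobalDesc.OK (d : GlobalDesc) : Prop :=
  d.beg % 8 = 0 ∧ d.sizeRz % 8 = 0 ∧ d.size ≤ d.sizeRz ∧ 0x100000 ≤ d.beg ∧ d.beg + d.sizeRz ≤ 0x200000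

instance (d : GlobalDesc) : Decidable d.OK := by
  unfold GlobalDesc.OK
  infer_instance

/-- **The stores of `__asan_register_globals` for ONE descriptor** (asan_rt.c), in program order: with `end = beg + size`, if
`end % 8 ≠ 0` the store of `end % 8` at the granule of `end`; then F9H at every granule from `(end + 7) / 8` up to the slot's end. -/
def registerOne (mem : Mem) (d : GlobalDesc) : Mem :=
  fillMem
    (if (d.beg + d.size) % 8 = 0 then mem
     else mem.write (shadowAddr ((d.beg + d.size) / 8)) (UInt8.ofNat ((d.beg + d.size) % 8)))
    ((d.beg + d.size + 7) / 8) 0xF9 ((d.beg + d.sizeRz) / 8 - (d.beg + d.size + 7) / 8)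

/-- **The memory after `__asan_register_globals(table, n)`**: the descriptors in table order. -/
def registerMem (mem : Mem) (ds : List GlobalDesc) : Mem := ds.foldl registerOne mem

/-- After one registration: the red zone behind the global holds F9H. -/
theorem shadowOf_registerOne_rz (mem : Mem) (d : GlobalDesc) (hd : d.OK) (g' : Nat)
    (h1 : (d.beg + d.size + 7) / 8 ≤ g') (h2 : g' < (d.beg + d.sizeRz) / 8) : shadowOf (registerOne mem d) g' = 0xF9 := by
  obtain ⟨k1, k2, k3, k4, k5⟩ := hd
  unfold registerOne
  rw [shadowOf_fillMem_in _ _ 0xF9 _ g' (by omega) h1 (by omega)]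
  rfl

/-- After one registration of a global whose end is not on a granule: the granule of the end holds `end % 8`. -/
theorem shadowOf_registerOne_part (mem : Mem) (d : GlobalDesc) (hd : d.OK) (hne : (d.beg + d.size) % 8 ≠ 0) :
    shadowOf (registerOne mem d) ((d.beg + d.size) / 8) = (d.beg + d.size) % 8 := by
  obtain ⟨k1, k2, k3, k4, k5⟩ := hd
  unfold registerOne
  rw [shadowOf_fillMem_out _ _ 0xF9 _ _ (by omega) (by omega) (by omega), if_neg hne,
    shadowOf_write mem _ _ _ (by omega) (by omega), if_pos rfl, UInt8.toNat_ofNat']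
  omega

/-- After one registration: every granule that is neither in the red zone nor the partial one is unchanged. -/
theorem shadowOf_registerOne_keep (mem : Mem) (d : GlobalDesc) (hd : d.OK) (g' : Nat) (hg' : g' < 0x200000)
    (h1 : g' < (d.beg + d.size + 7) / 8 ∨ (d.beg + d.sizeRz) / 8 ≤ g')
    (h2 : (d.beg + d.size) % 8 = 0 ∨ g' ≠ (d.beg + d.size) / 8) : shadowOf (registerOne mem d) g' = shadowOf mem g' := by
  obtain ⟨k1, k2, k3, k4, k5⟩ := hd
  unfold registerOne
  rw [shadowOf_fillMem_out _ _ 0xF9 _ g' (by omega) hg' (by omega)]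
  by_cases he : (d.beg + d.size) % 8 = 0
  · rw [if_pos he]
  · rw [if_neg he, shadowOf_write mem _ g' _ (by omega) hg']
    have e : ¬ g' = (d.beg + d.size) / 8 := by omega
    rw [if_neg e]

/-- **One registration describes the global exactly**, if its slot had shadow 0 before (the image starts wholly accessible). -/
theorem coversObj_registerOne (mem : Mem) (d : GlobalDesc) (hd : d.OK) (hclean : Clean mem d.beg (d.beg + d.sizeRz)) :
    CoversObj (registerOne mem d) d.obj := by
  have hd' := hd
  obtain ⟨h1, h2, h3, h4, h5⟩ := hd'
  refine ⟨h1, h4, ?_, ?_, ?_⟩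
  · show d.beg + d.size ≤ 0xC00000
    omega
  · intro g hg1 hg2
    have hg1' : d.beg / 8 ≤ g := hg1
    have hg2' : g < (d.beg + d.size) / 8 := hg2
    rw [shadowOf_registerOne_keep mem d hd g (by omega) (by omega) (by omega)]
    exact hclean g hg1' (by omega)
  · intro hne
    have hne' : d.size % 8 ≠ 0 := hne
    show shadowOf (registerOne mem d) ((d.beg + d.size) / 8) = d.size % 8
    rw [shadowOf_registerOne_part mem d hd (by omega)]
    omega

/-- The red zone behind a registered global is poisoned (a remark about tightness; SH5's second half). -/
theorem registerOne_poisoned (mem : Mem) (d : GlobalDesc) (hd : d.OK) :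
    Poisoned (registerOne mem d) ((d.beg + d.size + 7) / 8 * 8) (d.beg + d.sizeRz) := by
  intro g hg1 hg2
  rw [shadowOf_registerOne_rz mem d hd g (by omega) hg2]
  omega

/-- A descriptor's slot shares no granule with an object. -/
def GlobalDesc.Off (d : GlobalDesc) (o : Obj) : Prop := o.gHi ≤ d.beg / 8 ∨ (d.beg + d.sizeRz) / 8 ≤ o.gLo

/-- Two descriptors' slots do not meet. -/
def GlobalDesc.Apart (d d' : GlobalDesc) : Prop := d.beg + d.sizeRz ≤ d'.beg ∨ d'.beg + d'.sizeRz ≤ d.beg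

instance (d d' : GlobalDesc) : Decidable (d.Apart d') := by
  unfold GlobalDesc.Apart
  infer_instance

/-- **One registration: + one global.** -/
theorem ShadowOK.registerOne {objs : List Obj} {mem : Mem} (h : ShadowOK objs mem) (d : GlobalDesc) (hd : d.OK)
    (hclean : Clean mem d.beg (d.beg + d.sizeRz)) (hoff : ∀ o, o ∈ objs → d.Off o) :
    ShadowOK (d.obj :: objs) (Asan.registerOne mem d) := by
  have hd' := hd
  obtain ⟨h1, h2, h3, h4, h5⟩ := hd'
  refine h.change (d.beg / 8) ((d.beg + d.sizeRz) / 8) ?_ ?_ ?_ ?_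
  · intro g hg hout
    exact shadowOf_registerOne_keep mem d hd g hg (by omega) (by omega)
  · intro g hg hg1 hg2
    unfold WFv
    by_cases e1 : (d.beg + d.size + 7) / 8 ≤ g
    · rw [shadowOf_registerOne_rz mem d hd g e1 hg2]
      omega
    · by_cases e2 : (d.beg + d.size) % 8 ≠ 0 ∧ g = (d.beg + d.size) / 8
      · rw [e2.2, shadowOf_registerOne_part mem d hd e2.1]
        omega
      · rw [shadowOf_registerOne_keep mem d hd g hg (by omega) (by omega)]
        exact h.wf g hg
  · intro o ho
    rcases List.mem_cons.mp ho with rfl | hold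
    · exact Or.inr (coversObj_registerOne mem d hd hclean).covers
    · exact Or.inl ⟨hold, hoff o hold⟩
  · refine List.pairwise_cons.mpr ⟨?_, h.disjoint⟩
    intro o ho
    have hoo := hoff o ho
    unfold GlobalDesc.Off at hoo
    have e1 : d.obj.gLo = d.beg / 8 := rfl
    have e2 : d.obj.gHi = (d.beg + d.size + 7) / 8 := rfl
    unfold GranDisj
    rw [e1, e2]
    omega

/-- **`__asan_register_globals`: + the registered globals** (in reverse table order at the head of the list). Every slot had shadow
0 before, the slots are pairwise apart, and no slot shares a granule with a live object. -/
theorem ShadowOK.register {objs : List Obj} {mem : Mem} (h : ShadowOK objs mem) (ds : List GlobalDesc)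
    (hok : ∀ d, d ∈ ds → d.OK) (hclean : ∀ d, d ∈ ds → Clean mem d.beg (d.beg + d.sizeRz))
    (hapart : ds.Pairwise GlobalDesc.Apart) (hoff : ∀ d, d ∈ ds → ∀ o, o ∈ objs → d.Off o) :
    ShadowOK ((ds.map GlobalDesc.obj).reverse ++ objs) (registerMem mem ds) := by
  induction ds generalizing objs mem with
  | nil => exact h
  | cons d ds ih =>
    have hd := hok d List.mem_cons_self
    have hd' := hd
    obtain ⟨h1, h2, h3, h4, h5⟩ := hd'
    obtain ⟨hap1, hap2⟩ := List.pairwise_cons.mp hapart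
    have hstep := h.registerOne d hd (hclean d List.mem_cons_self) (hoff d List.mem_cons_self)
    have hrest := ih hstep (fun d' hd' => hok d' (List.mem_cons_of_mem _ hd')) ?_ hap2 ?_
    · have e : ((d :: ds).map GlobalDesc.obj).reverse ++ objs = (ds.map GlobalDesc.obj).reverse ++ (d.obj :: objs) := by
        simp only [List.map_cons, List.reverse_cons, List.append_assoc, List.singleton_append]
      rw [e]
      exact hrest
    · intro d' hd'
      have hok' := hok d' (List.mem_cons_of_mem _ hd')
      obtain ⟨k1, k2, k3, k4, k5⟩ := hok'
      have hap := hap1 d' hd'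
      unfold GlobalDesc.Apart at hap
      intro g hg1 hg2
      rw [shadowOf_registerOne_keep mem d hd g (by omega) (by omega) (by omega)]
      exact hclean d' (List.mem_cons_of_mem _ hd') g hg1 hg2
    · intro d' hd' o ho
      rcases List.mem_cons.mp ho with rfl | hold
      · have hok' := hok d' (List.mem_cons_of_mem _ hd')
        obtain ⟨k1, k2, k3, k4, k5⟩ := hok'
        have hap := hap1 d' hd'
        unfold GlobalDesc.Apart at hap
        have e1 : d.obj.gLo = d.beg / 8 := rfl
        have e2 : d.obj.gHi = (d.beg + d.size + 7) / 8 := rfl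
        unfold GlobalDesc.Off
        rw [e1, e2]
        omega
      · exact hoff d' (List.mem_cons_of_mem _ hd') o hold

/-- `__asan_register_globals` writes only shadow bytes of the image (`[100000H, 200000H)`: granules below 40000H). -/
theorem shadowOf_registerMem_high (mem : Mem) (ds : List GlobalDesc) (hok : ∀ d, d ∈ ds → d.OK) (g : Nat) (h1 : 0x40000 ≤ g)
    (h2 : g < 0x200000) : shadowOf (registerMem mem ds) g = shadowOf mem g := by
  induction ds generalizing mem with
  | nil => rfl
  | cons d ds ih =>
    have hd := hok d List.mem_cons_self
    have hd' := hd
    obtain ⟨k1, k2, k3, k4, k5⟩ := hd'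
    have e : registerMem mem (d :: ds) = registerMem (Asan.registerOne mem d) ds := rfl
    rw [e, ih (Asan.registerOne mem d) (fun d' hd' => hok d' (List.mem_cons_of_mem _ hd'))]
    exact shadowOf_registerOne_keep mem d hd g h2 (by omega) (by omega)

/-- `__asan_register_globals` keeps the seal. -/
theorem sealed_registerMem {mem : Mem} (hs : Sealed mem) (ds : List GlobalDesc) (hok : ∀ d, d ∈ ds → d.OK) :
    Sealed (registerMem mem ds) := by
  induction ds generalizing mem with
  | nil => exact hs
  | cons d ds ih =>
    have hd := hok d List.mem_cons_self
    have hd' := hd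
    obtain ⟨h1, h2, h3, h4, h5⟩ := hd'
    refine ih (mem := Asan.registerOne mem d) ?_ (fun d' hd' => hok d' (List.mem_cons_of_mem _ hd'))
    exact hs.of_same (d.beg / 8) ((d.beg + d.sizeRz) / 8) (by omega) (by omega)
      (fun g hg hout => shadowOf_registerOne_keep mem d hd g hg (by omega) (by omega))

/-! ### The compiler's inline shadow stores -/

/-- One inline shadow store of a prologue or an epilogue: `mov DWORD / QWORD PTR [r + 0xC00000 + idx], imm` with `r = base >> 3`:
`width` bytes (4 or 8) of the little-endian `value` at the shadow bytes of the granules `base / 8 + idx, …`. -/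
structure ShadowStore where
  idx : Nat
  width : Nat
  value : Nat
  deriving DecidableEq, Repr

/-- **The memory after a sequence of inline shadow stores** of the frame whose first granule is `g0`, in program order. -/
def storesMem (mem : Mem) (g0 : Nat) (ss : List ShadowStore) : Mem :=
  ss.foldl (fun m s => m.writeLE (shadowAddr (g0 + s.idx)) s.width s.value) mem

/-- What the stores do to the shadow byte at index `i` of the frame, whose value was `s0`: pure data, evaluated by `decide`. -/
def storesByte (ss : List ShadowStore) (i : Nat) (s0 : Nat) : Nat :=
  ss.foldl (fun b s => if s.idx ≤ i ∧ i < s.idx + s.width then s.value / 256 ^ (i - s.idx) % 256 else b) s0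

/-- The shadow after a sequence of inline stores, inside the frame's `n` granules. -/
theorem shadowOf_storesMem (mem : Mem) (g0 n : Nat) (ss : List ShadowStore) (hin : ∀ s, s ∈ ss → s.idx + s.width ≤ n)
    (hg : g0 + n ≤ 0x200000) (i : Nat) (hi : g0 + i < 0x200000) :
    shadowOf (storesMem mem g0 ss) (g0 + i) = storesByte ss i (shadowOf mem (g0 + i)) := by
  induction ss generalizing mem with
  | nil => rfl
  | cons s ss ih =>
    have hs := hin s List.mem_cons_self
    unfold storesMem storesByte
    simp only [List.foldl_cons]
    have ih' := ih (mem.writeLE (shadowAddr (g0 + s.idx)) s.width s.value) (fun s' hs' => hin s' (List.mem_cons_of_mem _ hs'))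
    unfold storesMem storesByte at ih'
    rw [ih', shadowOf_writeLE mem (g0 + s.idx) s.width s.value (g0 + i) (by omega) hi]
    have e1 : (g0 + s.idx ≤ g0 + i ∧ g0 + i < g0 + s.idx + s.width) ↔ (s.idx ≤ i ∧ i < s.idx + s.width) := by omega
    have e2 : g0 + i - (g0 + s.idx) = i - s.idx := by omega
    simp only [e1, e2]

/-- Outside the frame's `n` granules the stores change no shadow byte. -/
theorem shadowOf_storesMem_other (mem : Mem) (g0 n : Nat) (ss : List ShadowStore) (hin : ∀ s, s ∈ ss → s.idx + s.width ≤ n)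
    (hg : g0 + n ≤ 0x200000) (g' : Nat) (hg' : g' < 0x200000) (hout : g' < g0 ∨ g0 + n ≤ g') :
    shadowOf (storesMem mem g0 ss) g' = shadowOf mem g' := by
  induction ss generalizing mem with
  | nil => rfl
  | cons s ss ih =>
    have hs := hin s List.mem_cons_self
    unfold storesMem
    simp only [List.foldl_cons]
    have ih' := ih (mem.writeLE (shadowAddr (g0 + s.idx)) s.width s.value) (fun s' hs' => hin s' (List.mem_cons_of_mem _ hs'))
    unfold storesMem at ih'
    rw [ih', shadowOf_writeLE mem (g0 + s.idx) s.width s.value g' (by omega) hg']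
    have e1 : ¬ (g0 + s.idx ≤ g' ∧ g' < g0 + s.idx + s.width) := by omega
    simp only [e1, if_false]

/-- The stores write only shadow bytes of the frame: memory outside `[C00000H + g0, C00000H + g0 + n)` is unchanged. -/
theorem storesMem_sameExcept (mem : Mem) (g0 n : Nat) (ss : List ShadowStore) (hin : ∀ s, s ∈ ss → s.idx + s.width ≤ n)
    (hg : g0 + n ≤ 0x200000) : Mem.SameExcept [⟨0xC00000 + g0, 0xC00000 + g0 + n⟩] mem (storesMem mem g0 ss) := by
  induction ss generalizing mem with
  | nil => exact Mem.SameExcept.refl _ _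
  | cons s ss ih =>
    have hs := hin s List.mem_cons_self
    unfold storesMem
    simp only [List.foldl_cons]
    have ih' := ih (mem.writeLE (shadowAddr (g0 + s.idx)) s.width s.value) (fun s' hs' => hin s' (List.mem_cons_of_mem _ hs'))
    unfold storesMem at ih'
    refine Mem.SameExcept.trans ?_ ih'
    intro a ha
    have ha' := ha ⟨0xC00000 + g0, 0xC00000 + g0 + n⟩ List.mem_cons_self
    simp only at ha'
    by_cases hw : s.width = 0
    · rw [hw]
      rfl
    · have ea := shadowAddr_toNat (g0 + s.idx) (by omega)
      have hnw : Mem.NoWrap (shadowAddr (g0 + s.idx)) s.width := by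
        unfold Mem.NoWrap
        omega
      exact Mem.read_writeLE_disjoint_noWrap mem _ _ _ a hnw (by omega)

/-- Inline stores into the shadow of a frame inside the data space keep the seal. -/
theorem sealed_storesMem {mem : Mem} (hs : Sealed mem) (g0 n : Nat) (ss : List ShadowStore)
    (hin : ∀ s, s ∈ ss → s.idx + s.width ≤ n) (h0 : 0x20000 ≤ g0) (h1 : g0 + n ≤ 0x180000) : Sealed (storesMem mem g0 ss) :=
  hs.of_same g0 (g0 + n) h0 h1
    (fun g hg hout => shadowOf_storesMem_other mem g0 n ss hin (by omega) g hg hout)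

end Asan
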